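-- pv_equiv track=rewrite | github.com/Drakovek/AdventureWheel | adventure_wheel/adventure_wheel.py | get_decision_text
-- ===== SOURCE A (Python) =====
-- from typing import List
--
-- def get_decision_text(options:List[List[str]]=None,
--                 visited_links:List[str]=None) -> List[str]:
--     """
--     Returns text to show for the user to make a decision.
--     Based on options list, formated [link, name]
--     Colors options based on whether links have been visited already.
--
--     :param options: Options list, defaults to None
--     :type options: list[list[str]], optional
--     :param visited_links: List of link names that have been visited, defaults to None
--     :type visited_links: list[str], optional
--     :return: List of lines containing each option
--     :rtype: list[str]
--     """
--     # Return empty list if options are invalid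
--     if options is None:
--         return []
--     # Get colors based on whether links have been visited
--     colors = []
--     for option in options:
--         try:
--             link = option[0]
--             if link in visited_links:
--                 # Set color to green if visited
--                 colors.append("{{g}}")
--                 continue
--         except (IndexError, TypeError): pass
--         # Set color to blue if not visited or invalid
--         colors.append("{{b}}")
--     # Create text based on decisions available
--     text = []
--     link_num = 1
--     for i in range(0, len(options)):
--         try:
--             name = options[i][1]
--             text.append("{{0}}" + str(link_num) + ") " + colors[i] + name + "{{d}}")
--         except (IndexError, TypeError):
--             continue
--         link_num += 1
--     # Return the text
--     return text
-- ===== SOURCE B (Python) =====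
-- def get_decision_text(options=None, visited_links=None):
--     if options is None:
--         return []
--     text = []
--     link_num = 1
--     for option in options:
--         try:
--             color = "{{g}}" if option[0] in visited_links else "{{b}}"
--         except (IndexError, TypeError):
--             color = "{{b}}"
--         try:
--             name = option[1]
--         except (IndexError, TypeError):
--             continue
--         text.append("{{0}}" + str(link_num) + ") " + color + name + "{{d}}")
--         link_num += 1
--     return text
-- ===== Notes on version B (the rewrite author's own statement) =====
-- stated objective: simpler
-- what changed: Fuses A's two sequential loops (build a parallel colors list, then index it from a range loop) into one direct pass over options that computes each option's color on the spot, dropping the intermediate colors list and all index arithmetic.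
import Mathlib
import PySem

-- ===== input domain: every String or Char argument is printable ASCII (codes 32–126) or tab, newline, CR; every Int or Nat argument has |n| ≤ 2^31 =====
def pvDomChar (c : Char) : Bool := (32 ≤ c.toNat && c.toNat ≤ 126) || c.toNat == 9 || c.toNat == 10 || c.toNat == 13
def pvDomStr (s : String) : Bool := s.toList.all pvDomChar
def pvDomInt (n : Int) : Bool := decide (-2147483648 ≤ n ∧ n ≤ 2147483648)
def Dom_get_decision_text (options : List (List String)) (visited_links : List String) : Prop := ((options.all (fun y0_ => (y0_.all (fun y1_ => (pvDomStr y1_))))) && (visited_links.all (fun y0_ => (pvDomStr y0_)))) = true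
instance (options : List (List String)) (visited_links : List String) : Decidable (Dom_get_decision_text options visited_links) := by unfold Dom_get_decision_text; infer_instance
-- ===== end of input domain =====

-- B fuses A's two loops (build a parallel colors list, then index it from a range loop)
-- into one direct pass over options; same return value (no argument is mutated).

-- ===== PORT A =====
-- first loop: colors.append("{{g}}"/"{{b}}") per option (option[0] missing → IndexError → blue)
-- second loop: for i in range(0, len(options)): try options[i][1]; append line with colors[i]; link_num += 1
def get_decision_text (options : List (List String)) (visited_links : List String) : List String :=
  let colors := options.foldl (fun cs option =>
    cs ++ [match PySem.List.pyGet? option 0 with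
           | some link => if link ∈ visited_links then "{{g}}" else "{{b}}"
           | none => "{{b}}"]) []
  let st := (PySem.List.pyRange 0 (options.length : Int) 1).foldl
    (fun (st : List String × Int) i =>
      match PySem.List.pyGet? options i with
      | none => st                    -- unreachable: i is in range
      | some opt =>
        match PySem.List.pyGet? opt 1 with
        | none => st                  -- IndexError on options[i][1] → continue
        | some name =>
          match PySem.List.pyGet? colors i with
          | none => st                -- unreachable: colors has the same length
          | some color =>
            (st.1 ++ ["{{0}}" ++ PySem.Int.toStr st.2 ++ ") " ++ color ++ name ++ "{{d}}"],
             st.2 + 1)) ([], 1)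
  st.1

-- ===== PORT B =====
def get_decision_text_alt (options : List (List String)) (visited_links : List String) : List String :=
  (options.foldl (fun (st : List String × Int) option =>
    let color := match PySem.List.pyGet? option 0 with
                 | some link => if link ∈ visited_links then "{{g}}" else "{{b}}"
                 | none => "{{b}}"
    match PySem.List.pyGet? option 1 with
    | none => st                      -- IndexError on option[1] → continue
    | some name =>
      (st.1 ++ ["{{0}}" ++ PySem.Int.toStr st.2 ++ ") " ++ color ++ name ++ "{{d}}"],
       st.2 + 1)) ([], 1)).1

-- ===== PRECONDITION & SPEC =====
def Spec_get_decision_text (options : List (List String)) (visited_links : List String) (out : List String) : Prop := out = get_decision_text_alt options visited_links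
instance (options : List (List String)) (visited_links : List String) (out : List String) : Decidable (Spec_get_decision_text options visited_links out) := by unfold Spec_get_decision_text; infer_instance

-- ===== CLAIM (what is proved, stated in full; the proofs are below) =====
def Claim_equal_get_decision_text : Prop := ∀ (options : List (List String)) (visited_links : List String), Dom_get_decision_text options visited_links → Spec_get_decision_text options visited_links (get_decision_text options visited_links)

-- ===== LEMMAS AND PROOFS =====

-- the per-option color, as both ports compute it
def pvColor (visited_links : List String) (opt : List String) : String :=
  match PySem.List.pyGet? opt 0 with
  | some link => if link ∈ visited_links then "{{g}}" else "{{b}}"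
  | none => "{{b}}"

-- B's loop body
def pvStep (visited_links : List String) (st : List String × Int) (opt : List String) :
    List String × Int :=
  match PySem.List.pyGet? opt 1 with
  | none => st
  | some name =>
    (st.1 ++ ["{{0}}" ++ PySem.Int.toStr st.2 ++ ") " ++ pvColor visited_links opt ++ name ++ "{{d}}"],
     st.2 + 1)

theorem get_decision_text_alt_eq_fold (options : List (List String)) (visited_links : List String) :
    get_decision_text_alt options visited_links
      = (options.foldl (pvStep visited_links) ([], 1)).1 := by
  unfold get_decision_text_alt
  rfl

theorem get_decision_text_eq_fold (options : List (List String)) (visited_links : List String) :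
    get_decision_text options visited_links
      = (options.foldl (pvStep visited_links) ([], 1)).1 := by
  unfold get_decision_text
  have hcolors : options.foldl (fun cs option =>
      cs ++ [match PySem.List.pyGet? option 0 with
             | some link => if link ∈ visited_links then "{{g}}" else "{{b}}"
             | none => "{{b}}"]) ([] : List String)
      = options.map (pvColor visited_links) := by
    rw [PySem.List.foldl_append_singleton_eq_map]
    simp [pvColor]
  simp only [hcolors]
  congr 1
  have hbody : (PySem.List.pyRange 0 (options.length : Int) 1).foldl
      (fun (st : List String × Int) i =>
        match PySem.List.pyGet? options i with
        | none => st
        | some opt =>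
          match PySem.List.pyGet? opt 1 with
          | none => st
          | some name =>
            match PySem.List.pyGet? (options.map (pvColor visited_links)) i with
            | none => st
            | some color =>
              (st.1 ++ ["{{0}}" ++ PySem.Int.toStr st.2 ++ ") " ++ color ++ name ++ "{{d}}"],
               st.2 + 1)) ([], 1)
      = (PySem.List.pyRange 0 (options.length : Int) 1).foldl
          (fun st i => pvStep visited_links st (PySem.List.pyGetD options i [])) ([], 1) := by
    apply PySem.List.foldl_congr_mem
    intro st i hi
    rw [PySem.List.mem_pyRange_one] at hi
    have h0 : 0 ≤ i := hi.1
    have h1 : i < (options.length : Int) := hi.2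
    have hlen : i.toNat < options.length := by omega
    rw [PySem.List.pyGet?_eq_some_getElem options h0 (by exact_mod_cast h1),
        PySem.List.pyGet?_eq_some_getElem (options.map (pvColor visited_links)) h0
          (by simpa using h1)]
    have hd : PySem.List.pyGetD options i [] = options[i.toNat] := by
      simp [PySem.List.pyGetD, PySem.List.pyGet?_eq_some_getElem options h0
        (by exact_mod_cast h1 : i < (options.length : Int))]
    rw [hd]
    simp only [List.getElem_map]
    cases hx : PySem.List.pyGet? options[i.toNat] 1 <;> simp [pvStep, hx]
  rw [hbody]
  exact PySem.List.foldl_pyRange_zero_pyGetD' options [] (pvStep visited_links) ([], 1)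

-- ===== VERDICT (by name: the statement is the Claim_ definition above) =====
theorem get_decision_text_spec : Claim_equal_get_decision_text := by
  intro options visited_links _
  unfold Spec_get_decision_text
  rw [get_decision_text_eq_fold, get_decision_text_alt_eq_fold]
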